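-- pv_equiv track=rewrite | github.com/zonehisa/spartasekigae | app.py | is_valid_seating
-- ===== SOURCE A (Python) =====
-- from collections import defaultdict
--
-- def get_table_number(index):
--     """座席インデックスからテーブル番号（0-4）を取得"""
--     return index // 5
--
-- def get_table_members(seats):
--     """各テーブルのメンバーを取得"""
--     table_members = defaultdict(list)
--     for i, seat in enumerate(seats):
--         if seat:  # 空席でない場合
--             table_members[get_table_number(i)].append(seat)
--     return table_members
--
-- def is_valid_seating(previous_seats, new_seats):
--     """
--     前回の配置と新しい配置をチェック
--     1. 同じテーブルに3人以上のメンバーが重複していないか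
--     2. 同じ席に同じ人が座っていないか
--     """
--     # 同じ席チェック
--     for i, (prev_seat, new_seat) in enumerate(zip(previous_seats, new_seats)):
--         if prev_seat and new_seat and prev_seat == new_seat:
--             return False
--
--     # テーブルメンバーの重複チェック
--     prev_tables = get_table_members(previous_seats)
--     new_tables = get_table_members(new_seats)
--
--     # 各テーブルについて、前回のメンバーとの重複をチェック
--     for new_table_num, new_members in new_tables.items():
--         for prev_table_num, prev_members in prev_tables.items():
--             # 同じメンバーが3人以上重複している場合は無効
--             common_members = set(new_members) & set(prev_members)
--             if len(common_members) >= 3: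
--                 return False
--     return True
-- ===== SOURCE B (Python) =====
-- def is_valid_seating(previous_seats, new_seats):
--     # same-seat check (kept as in the description)
--     for prev_seat, new_seat in zip(previous_seats, new_seats):
--         if prev_seat and new_seat and prev_seat == new_seat:
--             return False
--
--     # index: member -> set of previous table numbers
--     prev_of = {}
--     for i, seat in enumerate(previous_seats):
--         if seat:
--             prev_of.setdefault(seat, set()).add(i // 5)
--
--     # one pass over the new seats: count, per (new table, prev table) pair,
--     # the distinct new-table members who sat at that prev table
--     seen = set()
--     counts = {}
--     for i, seat in enumerate(new_seats):
--         if seat: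
--             key = (i // 5, seat)
--             if key not in seen:
--                 seen.add(key)
--                 for t in prev_of.get(seat, ()):
--                     counts[(i // 5, t)] = counts.get((i // 5, t), 0) + 1
--     return all(c < 3 for c in counts.values())
-- ===== Notes on version B (the rewrite author's own statement) =====
-- stated objective: alternative
-- what changed: Replaced the all-pairs table-intersection check (for every new table x previous table, build two sets and intersect) by a single-pass member index: a dict member -> set of previous tables is built once, then one pass over the new seats increments a per-(new table, previous table) counter for each distinct (new table, member) occurrence; validity is 'no counter reaches 3'.
import Mathlib
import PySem

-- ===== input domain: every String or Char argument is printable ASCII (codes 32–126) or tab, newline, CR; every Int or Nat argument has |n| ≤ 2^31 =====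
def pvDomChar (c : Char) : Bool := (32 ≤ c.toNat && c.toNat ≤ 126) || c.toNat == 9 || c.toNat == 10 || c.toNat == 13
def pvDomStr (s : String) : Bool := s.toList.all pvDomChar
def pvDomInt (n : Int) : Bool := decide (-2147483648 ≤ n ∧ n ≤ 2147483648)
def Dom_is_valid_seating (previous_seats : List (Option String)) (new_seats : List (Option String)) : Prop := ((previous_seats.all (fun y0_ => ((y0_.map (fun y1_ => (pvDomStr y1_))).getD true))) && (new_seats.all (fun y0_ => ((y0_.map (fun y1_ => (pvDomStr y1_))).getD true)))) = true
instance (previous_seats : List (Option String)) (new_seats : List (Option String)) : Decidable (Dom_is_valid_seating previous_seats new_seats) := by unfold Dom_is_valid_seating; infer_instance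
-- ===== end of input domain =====

-- B replaces A's all-pairs table-intersection check by a one-pass member->previous-tables index with per-(new table, prev table) counters (a different algorithm of similar measured cost).


-- ===== PORT A =====
def get_table_number (index : Int) : Int := PySem.Int.floordiv index 5

def get_table_members (seats : List (Option String)) : PySem.Dict Int (List String) :=
  (PySem.List.enumerate seats 0).foldl
    (fun tm p =>
      p.2.elim tm (fun s =>
        if s = "" then tm else tm.modify (get_table_number p.1) [] (fun l => l ++ [s])))
    PySem.Dict.empty

def is_valid_seating (previous_seats : List (Option String)) (new_seats : List (Option String)) : Bool :=
  if (previous_seats.zip new_seats).any (fun pn =>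
      pn.1.elim false (fun p => pn.2.elim false (fun n => p != "" && n != "" && p == n)))
  then false
  else
    if (get_table_members new_seats).items.any (fun np =>
        (get_table_members previous_seats).items.any (fun pp =>
          decide (3 ≤ (PySem.Set.inter (PySem.Set.ofList np.2) (PySem.Set.ofList pp.2)).length)))
    then false
    else true

-- ===== PORT B =====
-- index: member -> set of previous table numbers (Source B's prev_of loop)
def pv_prev_of (previous_seats : List (Option String)) : PySem.Dict String (PySem.Set Int) :=
  (PySem.List.enumerate previous_seats 0).foldl
    (fun d p =>
      p.2.elim d (fun s =>
        if s = "" then d else d.modify s [] (fun ts => PySem.Set.add ts (PySem.Int.floordiv p.1 5))))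
    PySem.Dict.empty

-- Source B's single pass over the new seats, carrying (seen, counts)
def pv_scan (prev_of : PySem.Dict String (PySem.Set Int)) (new_seats : List (Option String)) :
    PySem.Set (Int × String) × PySem.Dict (Int × Int) Int :=
  (PySem.List.enumerate new_seats 0).foldl
    (fun sc p =>
      p.2.elim sc (fun s =>
        if s = "" then sc
        else
          let key := (PySem.Int.floordiv p.1 5, s)
          if PySem.Set.contains sc.1 key then sc
          else (PySem.Set.add sc.1 key,
                (prev_of.getD s []).foldl (fun c t => c.modify (key.1, t) 0 (fun n => n + 1)) sc.2)))
    (PySem.Set.empty, PySem.Dict.empty)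

def is_valid_seating_alt (previous_seats : List (Option String)) (new_seats : List (Option String)) : Bool :=
  if (previous_seats.zip new_seats).any (fun pn =>
      pn.1.elim false (fun p => pn.2.elim false (fun n => p != "" && n != "" && p == n)))
  then false
  else
    (pv_scan (pv_prev_of previous_seats) new_seats).2.values.all (fun c => decide (c < 3))

-- ===== PRECONDITION & SPEC =====
def Spec_is_valid_seating (previous_seats : List (Option String)) (new_seats : List (Option String)) (out : Bool) : Prop := out = is_valid_seating_alt previous_seats new_seats
instance (previous_seats : List (Option String)) (new_seats : List (Option String)) (out : Bool) : Decidable (Spec_is_valid_seating previous_seats new_seats out) := by unfold Spec_is_valid_seating; infer_instance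

-- ===== CLAIM (what is proved, stated in full; the proofs are below) =====
def Claim_equal_is_valid_seating : Prop := ∀ (previous_seats : List (Option String)) (new_seats : List (Option String)), Dom_is_valid_seating previous_seats new_seats → Spec_is_valid_seating previous_seats new_seats (is_valid_seating previous_seats new_seats)

-- ===== LEMMAS AND PROOFS =====

lemma pv_bool_eq {a b : Bool} (h : a = true ↔ b = true) : a = b := by
  cases a <;> cases b <;> simp_all

lemma pv_contains_eq {α : Type} [BEq α] [LawfulBEq α] (s : PySem.Set α) (y : α) :
    PySem.Set.contains s y = decide (y ∈ s) :=
  pv_bool_eq (by simp)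

-- the occupied seats, as (table number, member) pairs in seat order
def pvOcc (seats : List (Option String)) : List (Int × String) :=
  (PySem.List.enumerate seats 0).filterMap (fun p =>
    p.2.elim none (fun s => if s = "" then none else some (PySem.Int.floordiv p.1 5, s)))

-- members of table t, in seat order (what A's dict stores at key t)
def pvMem (seats : List (Option String)) (t : Int) : List String :=
  ((pvOcc seats).filter (fun p => p.1 == t)).map (fun p => p.2)

-- A's pairwise quantity: |set(new members of tn) ∩ set(prev members of tp)|
def pvInter (prev new : List (Option String)) (tn tp : Int) : Nat :=
  (PySem.Set.inter (PySem.Set.ofList (pvMem new tn)) (PySem.Set.ofList (pvMem prev tp))).length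

-- a fold over the truthy-seat pattern is a fold over pvOcc
lemma pv_foldl_occ {γ : Type} (seats : List (Option String)) (g : γ → Int → String → γ) (c : γ) :
    (PySem.List.enumerate seats 0).foldl
      (fun c p => p.2.elim c (fun s => if s = "" then c else g c (PySem.Int.floordiv p.1 5) s)) c
    = (pvOcc seats).foldl (fun c q => g c q.1 q.2) c := by
  unfold pvOcc
  generalize (PySem.List.enumerate seats 0) = l
  induction l generalizing c with
  | nil => rfl
  | cons p l ih =>
    rw [List.foldl_cons, List.filterMap_cons]
    cases hp : p.2 with
    | none => simp only [Option.elim_none]; exact ih c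
    | some s =>
      by_cases hs : s = ""
      · simp only [Option.elim_some, hs]; exact ih c
      · simp only [Option.elim_some, if_neg hs]
        rw [List.foldl_cons]
        exact ih _

lemma pv_get_table_members_eq (seats : List (Option String)) :
    get_table_members seats
    = (pvOcc seats).foldl (fun d q => d.modify q.1 [] (fun x => x ++ [q.2])) PySem.Dict.empty := by
  unfold get_table_members get_table_number
  exact pv_foldl_occ seats (fun d t s => d.modify t [] (fun x => x ++ [s])) PySem.Dict.empty

lemma pv_prev_of_eq (prev : List (Option String)) :
    pv_prev_of prev
    = (pvOcc prev).foldl (fun d q => d.modify q.2 [] (fun ts => PySem.Set.add ts q.1))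
        PySem.Dict.empty := by
  unfold pv_prev_of
  exact pv_foldl_occ prev (fun d t s => d.modify s [] (fun ts => PySem.Set.add ts t)) PySem.Dict.empty

-- Source B's per-pair step over an occupied (table, member) pair
def pvStep (P : PySem.Dict String (PySem.Set Int))
    (sc : PySem.Set (Int × String) × PySem.Dict (Int × Int) Int) (q : Int × String) :
    PySem.Set (Int × String) × PySem.Dict (Int × Int) Int :=
  if PySem.Set.contains sc.1 q then sc
  else (PySem.Set.add sc.1 q,
        (P.getD q.2 []).foldl (fun c t => c.modify (q.1, t) 0 (fun n => n + 1)) sc.2)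

lemma pv_scan_eq (P : PySem.Dict String (PySem.Set Int)) (new : List (Option String)) :
    pv_scan P new = (pvOcc new).foldl (pvStep P) (PySem.Set.empty, PySem.Dict.empty) := by
  unfold pv_scan
  exact pv_foldl_occ new (fun sc t s => pvStep P sc (t, s)) (PySem.Set.empty, PySem.Dict.empty)

-- nodup keys of any modify-fold
lemma pv_nodup_foldl_modify {κ ν β : Type} [BEq κ] [LawfulBEq κ] (l : List β) (key : β → κ)
    (d0 : ν) (f : β → ν → ν) (d : PySem.Dict κ ν) (h : d.keys.Nodup) :
    (l.foldl (fun d b => d.modify (key b) d0 (f b)) d).keys.Nodup := by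
  induction l generalizing d with
  | nil => exact h
  | cons b l ih =>
    refine ih _ ?_
    rw [PySem.Dict.keys_modify]
    exact PySem.Dict.nodup_keys_insert _ _ _ h

lemma pv_A_nodup (seats : List (Option String)) : (get_table_members seats).keys.Nodup := by
  rw [pv_get_table_members_eq]
  exact pv_nodup_foldl_modify (pvOcc seats) (fun q => q.1) [] (fun q x => x ++ [q.2]) _
    PySem.Dict.nodup_keys_empty

-- A's dict at key t holds exactly the members of table t
lemma pv_A_getD (seats : List (Option String)) (t : Int) :
    (get_table_members seats).getD t [] = pvMem seats t := by
  rw [pv_get_table_members_eq, PySem.Dict.getD_foldl_modify_append]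
  simp [pvMem]

lemma pv_A_contains (seats : List (Option String)) (t : Int) :
    (get_table_members seats).contains t = (pvOcc seats).any (fun q => q.1 == t) := by
  rw [pv_get_table_members_eq]
  have h : ∀ (l : List (Int × String)) (d : PySem.Dict Int (List String)),
      (l.foldl (fun d q => d.modify q.1 [] (fun x => x ++ [q.2])) d).contains t
      = (d.contains t || l.any (fun q => q.1 == t)) := by
    intro l
    induction l with
    | nil => intro d; simp
    | cons q l ih =>
      intro d
      rw [List.foldl_cons, ih, PySem.Dict.contains_modify, List.any_cons]
      by_cases hq : q.1 = t
      · rw [hq]; simp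
      · rw [beq_eq_false_iff_ne.mpr hq, beq_eq_false_iff_ne.mpr (Ne.symm hq)]
        simp
  rw [h, PySem.Dict.contains_empty, Bool.false_or]

-- prev_of's entry for member m is the set of tables m occupied
lemma pv_foldl_modify_add_getD (l : List (Int × String)) (m : String) :
    ∀ (d : PySem.Dict String (PySem.Set Int)),
    (l.foldl (fun d q => d.modify q.2 [] (fun ts => PySem.Set.add ts q.1)) d).getD m []
    = PySem.Set.update (d.getD m []) ((l.filter (fun q => q.2 == m)).map (fun q => q.1)) := by
  induction l with
  | nil => intro d; rw [List.foldl_nil, List.filter_nil, List.map_nil, PySem.Set.update_nil]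
  | cons q l ih =>
    intro d
    rw [List.foldl_cons, ih]
    by_cases hq : q.2 = m
    · rw [List.filter_cons_of_pos (by simp [hq]), List.map_cons, PySem.Set.update_cons,
        PySem.Dict.getD_modify, if_pos hq.symm, hq]
    · rw [List.filter_cons_of_neg (by simp [hq]), PySem.Dict.getD_modify,
        if_neg (fun h => hq h.symm)]

lemma pv_prev_of_getD (prev : List (Option String)) (m : String) :
    (pv_prev_of prev).getD m []
    = PySem.Set.ofList (((pvOcc prev).filter (fun q => q.2 == m)).map (fun q => q.1)) := by
  rw [pv_prev_of_eq, pv_foldl_modify_add_getD]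
  rw [PySem.Dict.getD_empty, PySem.Set.update_nil_left]

lemma pv_mem_prev_of (prev : List (Option String)) (m : String) (tp : Int) :
    tp ∈ (pv_prev_of prev).getD m [] ↔ (tp, m) ∈ pvOcc prev := by
  rw [pv_prev_of_getD]
  simp only [PySem.Set.mem_ofList, List.mem_map, List.mem_filter]
  constructor
  · rintro ⟨q, ⟨hq, hm⟩, rfl⟩
    simp only [beq_iff_eq] at hm
    exact hm ▸ hq
  · intro h
    exact ⟨(tp, m), ⟨h, by simp⟩, rfl⟩

lemma pv_prev_of_nodup_val (prev : List (Option String)) (m : String) :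
    ((pv_prev_of prev).getD m []).Nodup := by
  rw [pv_prev_of_getD]
  exact PySem.Set.nodup_ofList _

lemma pv_mem_pvMem (seats : List (Option String)) (t : Int) (m : String) :
    m ∈ pvMem seats t ↔ (t, m) ∈ pvOcc seats := by
  simp only [pvMem, List.mem_map, List.mem_filter]
  constructor
  · rintro ⟨q, ⟨hq, ht⟩, rfl⟩
    simp only [beq_iff_eq] at ht
    exact ht ▸ hq
  · intro h
    exact ⟨(t, m), ⟨h, by simp⟩, rfl⟩

-- dedup commutes with per-table restriction
lemma pv_ofList_filter_map (l : List (Int × String)) (t : Int) :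
    ((PySem.Set.ofList l).filter (fun p => p.1 == t)).map (fun p => p.2)
    = PySem.Set.ofList ((l.filter (fun p => p.1 == t)).map (fun p => p.2)) := by
  induction l using List.reverseRecOn with
  | nil => rfl
  | append_singleton l x ih =>
    rw [PySem.Set.ofList_append_singleton, PySem.Set.add_eq_ite, List.filter_append,
      List.map_append]
    by_cases ht : x.1 = t
    · have hfx : (List.filter (fun p => p.1 == t) [x]).map (fun p => p.2) = [x.2] := by
        simp [ht]
      have hmem : x.2 ∈ (l.filter (fun p => p.1 == t)).map (fun p => p.2) ↔ x ∈ l := by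
        constructor
        · intro hm
          rcases List.mem_map.mp hm with ⟨q, hq, hq2⟩
          rcases List.mem_filter.mp hq with ⟨hql, hqt⟩
          simp only [beq_iff_eq] at hqt
          have : q = x := Prod.ext (by rw [hqt, ht]) hq2
          exact this ▸ hql
        · intro hx
          exact List.mem_map_of_mem (List.mem_filter.mpr ⟨hx, by simp [ht]⟩)
      rw [hfx, PySem.Set.ofList_append_singleton, PySem.Set.add_eq_ite]
      by_cases hx : x ∈ l
      · rw [if_pos (by simpa [PySem.Set.mem_ofList] using hx),
          if_pos (by simpa [PySem.Set.mem_ofList] using hmem.mpr hx)]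
        exact ih
      · rw [if_neg (by simpa [PySem.Set.mem_ofList] using hx),
          if_neg (by simpa [PySem.Set.mem_ofList] using (fun hm => hx (hmem.mp hm))),
          List.filter_append, List.map_append, hfx, ih]
    · have hfx : (List.filter (fun p => p.1 == t) [x]).map (fun p => p.2) = [] := by
        simp [ht]
      rw [hfx, List.append_nil]
      by_cases hx : x ∈ l
      · rw [if_pos (by simpa [PySem.Set.mem_ofList] using hx)]
        exact ih
      · rw [if_neg (by simpa [PySem.Set.mem_ofList] using hx),
          List.filter_append, List.map_append, hfx, List.append_nil]
        exact ih

-- one cons step of the deduplicated-diff count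
lemma pv_diff_countP_cons (x : Int × String) (l : List (Int × String))
    (s : PySem.Set (Int × String)) (f : Int × String → Bool) :
    (PySem.Set.diff (PySem.Set.ofList (x :: l)) s).countP f
    = (if x ∈ s then 0 else if f x then 1 else 0)
      + (PySem.Set.diff (PySem.Set.ofList l) (PySem.Set.add s x)).countP f := by
  rw [PySem.Set.ofList_cons]
  unfold PySem.Set.diff PySem.Set.discard
  rw [List.countP_filter, List.countP_cons, List.countP_filter, List.countP_filter]
  by_cases hx : x ∈ s
  · rw [if_pos hx, PySem.Set.add_of_mem hx]
    have h1 : (f x && !PySem.Set.contains s x) = false := by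
      simp [hx]
    rw [h1, if_neg (by simp), Nat.add_zero, Nat.zero_add]
    apply List.countP_congr
    intro a _
    by_cases ha : a = x
    · subst ha
      simp [hx]
    · simp [ha]
  · rw [if_neg hx, PySem.Set.add_of_not_mem hx]
    have h1 : (f x && !PySem.Set.contains s x) = f x := by
      simp [hx]
    rw [h1, Nat.add_comm]
    congr 1
    apply List.countP_congr
    intro a _
    have hca : PySem.Set.contains (s ++ [x]) a = (PySem.Set.contains s a || a == x) :=
      pv_bool_eq (by simp [beq_iff_eq, List.mem_append])
    rw [hca, Bool.not_or, Bool.and_assoc]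

-- the invariant of Source B's single pass: each counter counts the distinct unseen pairs
lemma pv_scan_getD (P : PySem.Dict String (PySem.Set Int)) (hP : ∀ m, (P.getD m []).Nodup)
    (q0 : Int × Int) :
    ∀ (l : List (Int × String)) (s : PySem.Set (Int × String)) (c : PySem.Dict (Int × Int) Int),
    ((l.foldl (pvStep P) (s, c)).2).getD q0 0
    = c.getD q0 0
      + (((PySem.Set.diff (PySem.Set.ofList l) s).countP
          (fun p => (p.1 == q0.1) && PySem.Set.contains (P.getD p.2 []) q0.2) : Nat) : Int) := by
  intro l
  induction l with
  | nil =>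
    intro s c
    simp [PySem.Set.diff, PySem.Set.ofList_nil]
  | cons x l ih =>
    intro s c
    rw [List.foldl_cons, pv_diff_countP_cons]
    by_cases hx : x ∈ s
    · have hstep : pvStep P (s, c) x = (s, c) := by
        unfold pvStep
        rw [if_pos (by rw [pv_contains_eq]; exact decide_eq_true hx)]
      rw [hstep, ih s c, if_pos hx, PySem.Set.add_of_mem hx, Nat.zero_add]
    · have hstep : pvStep P (s, c) x
          = (PySem.Set.add s x,
             (P.getD x.2 []).foldl (fun c t => c.modify (x.1, t) 0 (fun n => n + 1)) c) := by
        unfold pvStep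
        rw [if_neg (by rw [pv_contains_eq]; simp [hx])]
      rw [hstep, ih, if_neg hx]
      have hmap : ((P.getD x.2 []).map (fun t => ((x.1, t) : Int × Int))).foldl
            (fun d q => d.modify q 0 (fun n => n + 1)) c
          = (P.getD x.2 []).foldl (fun c t => c.modify (x.1, t) 0 (fun n => n + 1)) c :=
        List.foldl_map
      rw [← hmap, PySem.Dict.getD_foldl_modify_add_one]
      have hcount : ((P.getD x.2 []).map (fun t => ((x.1, t) : Int × Int))).count q0
          = (if (x.1 == q0.1) && PySem.Set.contains (P.getD x.2 []) q0.2 then 1 else 0) := by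
        by_cases h1 : x.1 = q0.1
        · by_cases h2 : q0.2 ∈ P.getD x.2 []
          · have hinj : Function.Injective (fun t => ((x.1, t) : Int × Int)) := by
              intro a b hab
              simpa using congrArg Prod.snd hab
            have hq0 : (q0 : Int × Int) = (fun t => ((x.1, t) : Int × Int)) q0.2 := by
              simp [h1]
            have hcnt : ((P.getD x.2 []).map (fun t => ((x.1, t) : Int × Int))).count q0 = 1 := by
              rw [hq0, List.count_map_of_injective _ _ hinj,
                List.count_eq_one_of_mem (hP x.2) h2]
            rw [hcnt, if_pos (by simp [h1, h2])]
          · have hcnt : ((P.getD x.2 []).map (fun t => ((x.1, t) : Int × Int))).count q0 = 0 := by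
              rw [List.count_eq_zero]
              intro hmem
              rcases List.mem_map.mp hmem with ⟨t, ht, hteq⟩
              apply h2
              have : t = q0.2 := by simpa using congrArg Prod.snd hteq
              exact this ▸ ht
            rw [hcnt, if_neg (by simp [h2])]
        · have hcnt : ((P.getD x.2 []).map (fun t => ((x.1, t) : Int × Int))).count q0 = 0 := by
            rw [List.count_eq_zero]
            intro hmem
            rcases List.mem_map.mp hmem with ⟨t, ht, hteq⟩
            exact h1 (by simpa using congrArg Prod.fst hteq)
          rw [hcnt, if_neg (by simp [h1])]
      rw [hcount]
      by_cases hb : ((x.1 == q0.1) && PySem.Set.contains (P.getD x.2 []) q0.2) = true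
      · rw [if_pos hb]; push_cast; ring
      · rw [if_neg hb]; push_cast; ring

lemma pv_scan_nodup (P : PySem.Dict String (PySem.Set Int)) :
    ∀ (l : List (Int × String)) (s : PySem.Set (Int × String)) (c : PySem.Dict (Int × Int) Int),
    c.keys.Nodup → ((l.foldl (pvStep P) (s, c)).2).keys.Nodup := by
  intro l
  induction l with
  | nil => intro s c h; exact h
  | cons x l ih =>
    intro s c h
    rw [List.foldl_cons]
    unfold pvStep
    by_cases hx : PySem.Set.contains s x = true
    · rw [if_pos hx]
      exact ih s c h
    · rw [if_neg hx]
      exact ih _ _ (pv_nodup_foldl_modify _ (fun t => ((x.1, t) : Int × Int)) 0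
        (fun t n => n + 1) c h)

-- counts.getD at (t1, t2), in closed form
lemma pv_counts_getD (prev new : List (Option String)) (t1 t2 : Int) :
    (pv_scan (pv_prev_of prev) new).2.getD (t1, t2) 0
    = (((PySem.Set.ofList (pvOcc new)).countP
        (fun p => (p.1 == t1) && PySem.Set.contains ((pv_prev_of prev).getD p.2 []) t2) : Nat) : Int) := by
  rw [pv_scan_eq, pv_scan_getD _ (fun m => pv_prev_of_nodup_val prev m) (t1, t2),
    PySem.Dict.getD_empty, zero_add]
  congr 2
  · show PySem.Set.diff (PySem.Set.ofList (pvOcc new)) PySem.Set.empty = PySem.Set.ofList (pvOcc new)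
    unfold PySem.Set.diff
    apply List.filter_eq_self.mpr
    intro a _
    simp [PySem.Set.empty]

lemma pv_countP_eq_inter (prev new : List (Option String)) (tn tp : Int) :
    (PySem.Set.ofList (pvOcc new)).countP
      (fun p => (p.1 == tn) && PySem.Set.contains ((pv_prev_of prev).getD p.2 []) tp)
    = pvInter prev new tn tp := by
  have h1 : ∀ p : Int × String,
      ((p.1 == tn) && PySem.Set.contains ((pv_prev_of prev).getD p.2 []) tp)
      = (PySem.Set.contains (PySem.Set.ofList (pvMem prev tp)) p.2 && (p.1 == tn)) := by
    intro p
    rw [Bool.and_comm]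
    congr 1
    apply pv_bool_eq
    rw [pv_contains_eq, pv_contains_eq]
    simp only [decide_eq_true_eq]
    rw [pv_mem_prev_of, PySem.Set.mem_ofList, pv_mem_pvMem]
  have hc : (PySem.Set.ofList (pvOcc new)).countP
      (fun p => (p.1 == tn) && PySem.Set.contains ((pv_prev_of prev).getD p.2 []) tp)
      = (PySem.Set.ofList (pvOcc new)).countP
          (fun p => PySem.Set.contains (PySem.Set.ofList (pvMem prev tp)) p.2 && (p.1 == tn)) :=
    List.countP_congr (fun a _ => by rw [h1 a])
  rw [hc]
  have h3 : ((PySem.Set.ofList (pvOcc new)).filter (fun p => p.1 == tn)).countP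
      (fun a => PySem.Set.contains (PySem.Set.ofList (pvMem prev tp)) a.2)
      = (PySem.Set.ofList (pvOcc new)).countP
          (fun a => PySem.Set.contains (PySem.Set.ofList (pvMem prev tp)) a.2 && (a.1 == tn)) :=
    List.countP_filter
  rw [← h3]
  have h2 : ((((PySem.Set.ofList (pvOcc new)).filter (fun p => p.1 == tn)).map
        (fun p => p.2)).countP (fun m => PySem.Set.contains (PySem.Set.ofList (pvMem prev tp)) m))
      = ((PySem.Set.ofList (pvOcc new)).filter (fun p => p.1 == tn)).countP
          (fun a => PySem.Set.contains (PySem.Set.ofList (pvMem prev tp)) a.2) :=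
    List.countP_map
  rw [← h2, pv_ofList_filter_map]
  show (PySem.Set.ofList (pvMem new tn)).countP
      (fun m => PySem.Set.contains (PySem.Set.ofList (pvMem prev tp)) m) = pvInter prev new tn tp
  unfold pvInter PySem.Set.inter
  rw [List.countP_eq_length_filter]

lemma pv_counts_false (d : PySem.Dict (Int × Int) Int) (hn : d.keys.Nodup) :
    (d.values.all (fun c => decide (c < 3)) = false) ↔ ∃ q : Int × Int, 3 ≤ d.getD q 0 := by
  constructor
  · intro h
    have h' : ¬ ∀ v ∈ d.values, decide (v < 3) = true := by
      rw [← List.all_eq_true]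
      simp [h]
    push Not at h'
    obtain ⟨v, hv, hlt⟩ := h'
    have hlt' : 3 ≤ v := by simpa using hlt
    obtain ⟨p, hp, hpv⟩ := List.mem_map.mp (show v ∈ d.items.map (fun x => x.2) from hv)
    refine ⟨p.1, ?_⟩
    have hg : d.get? p.1 = some p.2 :=
      PySem.Dict.get?_of_mem_items d (show (p.1, p.2) ∈ d.items from hp) hn
    rw [PySem.Dict.getD_eq_get?_getD, hg]
    simpa [hpv] using hlt'
  · rintro ⟨q, hq⟩
    cases hg : d.get? q with
    | none =>
      rw [PySem.Dict.getD_eq_get?_getD, hg] at hq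
      norm_num at hq
    | some v =>
      have hvmem : v ∈ d.values :=
        List.mem_map_of_mem (PySem.Dict.mem_items_of_get?_eq_some d hg)
      have hnot : ¬ (d.values.all (fun c => decide (c < 3)) = true) := by
        rw [List.all_eq_true]
        intro hall
        have h1 := hall v hvmem
        rw [PySem.Dict.getD_eq_get?_getD, hg] at hq
        simp only [Option.getD_some] at hq
        simp only [decide_eq_true_eq] at h1
        omega
      cases hfin : d.values.all (fun c => decide (c < 3)) with
      | false => rfl
      | true => exact absurd hfin hnot

lemma pv_B_iff (prev new : List (Option String)) :
    ((pv_scan (pv_prev_of prev) new).2.values.all (fun c => decide (c < 3)) = false)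
    ↔ ∃ tn tp : Int, 3 ≤ pvInter prev new tn tp := by
  rw [pv_counts_false _ (by
    rw [pv_scan_eq]
    exact pv_scan_nodup _ _ _ _ PySem.Dict.nodup_keys_empty)]
  constructor
  · rintro ⟨⟨t1, t2⟩, hq⟩
    refine ⟨t1, t2, ?_⟩
    rw [pv_counts_getD, pv_countP_eq_inter] at hq
    exact_mod_cast hq
  · rintro ⟨t1, t2, h⟩
    refine ⟨(t1, t2), ?_⟩
    rw [pv_counts_getD, pv_countP_eq_inter]
    exact_mod_cast h

lemma pv_A_iff (prev new : List (Option String)) :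
    ((get_table_members new).items.any (fun np =>
        (get_table_members prev).items.any (fun pp =>
          decide (3 ≤ (PySem.Set.inter (PySem.Set.ofList np.2) (PySem.Set.ofList pp.2)).length))) = true)
    ↔ ∃ tn tp : Int, 3 ≤ pvInter prev new tn tp := by
  rw [List.any_eq_true]
  constructor
  · rintro ⟨np, hnp, h⟩
    rw [List.any_eq_true] at h
    obtain ⟨pp, hpp, h3⟩ := h
    rw [decide_eq_true_eq] at h3
    refine ⟨np.1, pp.1, ?_⟩
    have h1 : np.2 = pvMem new np.1 := by
      rw [← pv_A_getD, PySem.Dict.getD_eq_get?_getD,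
        PySem.Dict.get?_of_mem_items _ (show (np.1, np.2) ∈ _ from hnp) (pv_A_nodup new)]
      rfl
    have h2 : pp.2 = pvMem prev pp.1 := by
      rw [← pv_A_getD, PySem.Dict.getD_eq_get?_getD,
        PySem.Dict.get?_of_mem_items _ (show (pp.1, pp.2) ∈ _ from hpp) (pv_A_nodup prev)]
      rfl
    unfold pvInter
    rw [← h1, ← h2]
    exact h3
  · rintro ⟨tn, tp, h3⟩
    have hn_ne : pvMem new tn ≠ [] := by
      intro h0
      unfold pvInter at h3
      rw [h0] at h3
      simp [PySem.Set.inter, PySem.Set.ofList_nil] at h3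
    have hp_ne : pvMem prev tp ≠ [] := by
      intro h0
      unfold pvInter at h3
      rw [h0] at h3
      simp [PySem.Set.inter, PySem.Set.ofList_nil] at h3
    obtain ⟨m1, hm1⟩ := List.exists_mem_of_ne_nil _ hn_ne
    obtain ⟨m2, hm2⟩ := List.exists_mem_of_ne_nil _ hp_ne
    have hc1 : (get_table_members new).contains tn = true := by
      rw [pv_A_contains, List.any_eq_true]
      exact ⟨(tn, m1), (pv_mem_pvMem new tn m1).mp hm1, by simp⟩
    have hc2 : (get_table_members prev).contains tp = true := by
      rw [pv_A_contains, List.any_eq_true]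
      exact ⟨(tp, m2), (pv_mem_pvMem prev tp m2).mp hm2, by simp⟩
    cases hg1 : (get_table_members new).get? tn with
    | none =>
      rw [PySem.Dict.contains_eq_isSome_get?, hg1] at hc1
      simp at hc1
    | some v1 =>
      cases hg2 : (get_table_members prev).get? tp with
      | none =>
        rw [PySem.Dict.contains_eq_isSome_get?, hg2] at hc2
        simp at hc2
      | some v2 =>
        have hv1 : v1 = pvMem new tn := by
          rw [← pv_A_getD, PySem.Dict.getD_eq_get?_getD, hg1]
          rfl
        have hv2 : v2 = pvMem prev tp := by
          rw [← pv_A_getD, PySem.Dict.getD_eq_get?_getD, hg2]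
          rfl
        refine ⟨(tn, v1), PySem.Dict.mem_items_of_get?_eq_some _ hg1, ?_⟩
        rw [List.any_eq_true]
        refine ⟨(tp, v2), PySem.Dict.mem_items_of_get?_eq_some _ hg2, ?_⟩
        rw [decide_eq_true_eq]
        show 3 ≤ (PySem.Set.inter (PySem.Set.ofList v1) (PySem.Set.ofList v2)).length
        rw [hv1, hv2]
        exact h3

-- ===== VERDICT (by name: the statement is the Claim_ definition above) =====
theorem is_valid_seating_spec : Claim_equal_is_valid_seating := by
  intro previous_seats new_seats _
  show is_valid_seating previous_seats new_seats = is_valid_seating_alt previous_seats new_seats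
  unfold is_valid_seating is_valid_seating_alt
  by_cases hz : ((previous_seats.zip new_seats).any (fun pn =>
      pn.1.elim false (fun p => pn.2.elim false (fun n => p != "" && n != "" && p == n)))) = true
  · rw [if_pos hz, if_pos hz]
  · rw [if_neg hz, if_neg hz]
    have hAB : ((get_table_members new_seats).items.any (fun np =>
        (get_table_members previous_seats).items.any (fun pp =>
          decide (3 ≤ (PySem.Set.inter (PySem.Set.ofList np.2) (PySem.Set.ofList pp.2)).length))))
        = !((pv_scan (pv_prev_of previous_seats) new_seats).2.values.all (fun c => decide (c < 3))) := by
      apply pv_bool_eq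
      rw [pv_A_iff]
      rw [Bool.not_eq_true']
      exact (pv_B_iff previous_seats new_seats).symm
    rw [hAB]
    cases hb : ((pv_scan (pv_prev_of previous_seats) new_seats).2.values.all
        (fun c => decide (c < 3))) <;> rfl
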